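-- pv_equiv track=rewrite | github.com/guobiao-ye/LAMP_primer_designer | heuristic_primer_design.py | filter_reverse_oligos
-- ===== SOURCE A (Python) =====
-- def filter_reverse_oligos(oligos, sequence, quasispecies_sequences):
--     """
--     Filter oligos based on their sequence matching across all sequences in the list. Only used when evolutionary conservation is considered
--
--     :param oligos: List of oligos with position, length, and sequence.
--     :param sequence: Target sequence (e.g., coding strand).
--     :param quasispecies_sequences: List of quasispecies sequences (e.g., multiple sequence alignment).
--     :return: List of oligos that match in all sequences.
--     """
--     filtered_oligos = oligos.copy()
--
--     for quasispecies_sequence in quasispecies_sequences: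
--         surviving_oligos = []
--         for oligo in filtered_oligos:
--             position = oligo['position']
--             length = oligo['length']
--             expected_sequence = sequence[position:position - length]
--
--             # Extract the corresponding region from the current sequence
--             actual_sequence = quasispecies_sequence[position:position - length]
--
--             # Check if the sequence matches
--             if actual_sequence == expected_sequence:
--                 surviving_oligos.append(oligo)
--
--         # Update the filtered_oligos to only include those that survived this sequence
--         filtered_oligos = surviving_oligos
--
--     return filtered_oligos
-- ===== SOURCE B (Python) =====
-- def filter_reverse_oligos(oligos, sequence, quasispecies_sequences):
--     """Inverted loop nesting, built back-to-front: walk the oligos in reverse,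
--     test each against every quasispecies sequence with an early break, push
--     survivors onto an accumulator, then reverse once at the end."""
--     acc = []
--     for oligo in reversed(oligos):
--         ok = True
--         for quasi in quasispecies_sequences:
--             position = oligo['position']
--             length = oligo['length']
--             if quasi[position:position - length] != sequence[position:position - length]:
--                 ok = False
--                 break
--         if ok:
--             acc.append(oligo)
--     acc.reverse()
--     return acc
-- ===== Notes on version B (the rewrite author's own statement) =====
-- stated objective: alternative
-- what changed: Inverts the loop nesting and builds the result back-to-front: one reverse walk over the oligos, each tested against every quasispecies sequence with an early break, instead of Q rounds each rebuilding the surviving-oligo list.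
import Mathlib
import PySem

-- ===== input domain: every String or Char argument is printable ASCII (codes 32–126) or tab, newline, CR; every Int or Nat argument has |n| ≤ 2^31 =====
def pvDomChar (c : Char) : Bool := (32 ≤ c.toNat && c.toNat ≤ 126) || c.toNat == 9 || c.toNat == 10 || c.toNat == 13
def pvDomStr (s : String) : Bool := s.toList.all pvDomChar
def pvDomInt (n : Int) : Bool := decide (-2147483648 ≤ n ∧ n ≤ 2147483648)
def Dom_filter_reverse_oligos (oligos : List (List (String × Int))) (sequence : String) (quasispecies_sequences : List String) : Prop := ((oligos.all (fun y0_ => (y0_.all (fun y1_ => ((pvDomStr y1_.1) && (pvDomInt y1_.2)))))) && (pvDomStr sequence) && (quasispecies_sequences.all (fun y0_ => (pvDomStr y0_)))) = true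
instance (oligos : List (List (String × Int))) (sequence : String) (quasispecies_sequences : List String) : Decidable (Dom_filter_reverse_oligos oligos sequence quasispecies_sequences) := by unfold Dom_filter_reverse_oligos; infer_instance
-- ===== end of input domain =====

-- B inverts A's loop nesting and builds the result back-to-front: one reverse walk
-- over the oligos, each tested against every quasispecies sequence with an early
-- break, instead of Q rounds each rebuilding the surviving-oligo list (objective: alternative).

-- ===== PORT A =====
-- Q rounds; each round rebuilds the surviving-oligo list from the previous one.
-- Outside Pre_ (a missing 'position'/'length' key, where Python raises KeyError)
-- the lookup's `.getD 0` value is not claimed to match anything.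
def filter_reverse_oligos (oligos : List (List (String × Int))) (sequence : String) (quasispecies_sequences : List String) : List (List (String × Int)) :=
  quasispecies_sequences.foldl
    (fun filtered_oligos quasispecies_sequence =>
      filtered_oligos.foldl
        (fun surviving_oligos oligo =>
          let position := (List.lookup "position" oligo).getD 0
          let length := (List.lookup "length" oligo).getD 0
          let expected_sequence := PySem.Str.slice sequence (some position) (some (position - length))
          let actual_sequence := PySem.Str.slice quasispecies_sequence (some position) (some (position - length))
          if actual_sequence == expected_sequence then surviving_oligos ++ [oligo]
          else surviving_oligos)
        [])
    oligos

-- ===== PORT B =====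
-- the inner quasi loop with its early break, as structural recursion over the list
def frOk (sequence : String) (oligo : List (String × Int)) : List String → Bool
  | [] => true
  | quasi :: rest =>
      let position := (List.lookup "position" oligo).getD 0
      let length := (List.lookup "length" oligo).getD 0
      if PySem.Str.slice quasi (some position) (some (position - length)) !=
          PySem.Str.slice sequence (some position) (some (position - length)) then
        false
      else
        frOk sequence oligo rest

-- reverse walk over the oligos, survivors pushed onto acc, one final reverse
def filter_reverse_oligos_alt (oligos : List (List (String × Int))) (sequence : String) (quasispecies_sequences : List String) : List (List (String × Int)) :=
  (oligos.reverse.foldl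
    (fun acc oligo => if frOk sequence oligo quasispecies_sequences then acc ++ [oligo] else acc)
    []).reverse

-- ===== PRECONDITION & SPEC =====
-- Pre_ excludes exactly the inputs where Python A raises KeyError: a nonempty
-- quasispecies list together with some oligo missing the 'position' or 'length' key.
def Pre_filter_reverse_oligos (oligos : List (List (String × Int))) (sequence : String) (quasispecies_sequences : List String) : Prop :=
  quasispecies_sequences = [] ∨
    ∀ o ∈ oligos, (List.lookup "position" o).isSome ∧ (List.lookup "length" o).isSome
instance (oligos : List (List (String × Int))) (sequence : String) (quasispecies_sequences : List String) : Decidable (Pre_filter_reverse_oligos oligos sequence quasispecies_sequences) := by unfold Pre_filter_reverse_oligos; infer_instance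

def pvWitness_filter_reverse_oligos : (List (List (String × Int))) × String × List String :=
  ([[("position", 1), ("length", 2)]], "ACGT", ["ACGA"])

def Spec_filter_reverse_oligos (oligos : List (List (String × Int))) (sequence : String) (quasispecies_sequences : List String) (out : List (List (String × Int))) : Prop := out = filter_reverse_oligos_alt oligos sequence quasispecies_sequences
instance (oligos : List (List (String × Int))) (sequence : String) (quasispecies_sequences : List String) (out : List (List (String × Int))) : Decidable (Spec_filter_reverse_oligos oligos sequence quasispecies_sequences out) := by unfold Spec_filter_reverse_oligos; infer_instance

-- ===== CLAIM (what is proved, stated in full; the proofs are below) =====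
def Claim_equal_filter_reverse_oligos : Prop := ∀ (oligos : List (List (String × Int))) (sequence : String) (quasispecies_sequences : List String), Dom_filter_reverse_oligos oligos sequence quasispecies_sequences → Pre_filter_reverse_oligos oligos sequence quasispecies_sequences → Spec_filter_reverse_oligos oligos sequence quasispecies_sequences (filter_reverse_oligos oligos sequence quasispecies_sequences)

-- ===== LEMMAS AND PROOFS =====

-- the per-(quasispecies, oligo) match test both programs evaluate
def pvMatch (sequence q : String) (o : List (String × Int)) : Bool :=
  let position := (List.lookup "position" o).getD 0
  let length := (List.lookup "length" o).getD 0
  PySem.Str.slice q (some position) (some (position - length)) ==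
    PySem.Str.slice sequence (some position) (some (position - length))

lemma portA_eq (oligos : List (List (String × Int))) (sequence : String) (qs : List String) :
    filter_reverse_oligos oligos sequence qs =
      qs.foldl (fun acc q => acc.filter (pvMatch sequence q)) oligos := by
  unfold filter_reverse_oligos
  congr 1
  funext acc q
  exact PySem.List.foldl_append_if_eq_filter (pvMatch sequence q) acc []

lemma frOk_eq_all (sequence : String) (o : List (String × Int)) (qs : List String) :
    frOk sequence o qs = qs.all (fun q => pvMatch sequence q o) := by
  induction qs with
  | nil => rfl
  | cons q rest ih =>
    simp only [frOk, pvMatch, List.all_cons, ih, bne]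
    split <;> simp_all

lemma portB_eq (oligos : List (List (String × Int))) (sequence : String) (qs : List String) :
    filter_reverse_oligos_alt oligos sequence qs =
      oligos.filter (fun o => qs.all (fun q => pvMatch sequence q o)) := by
  unfold filter_reverse_oligos_alt
  rw [PySem.List.foldl_append_if_eq_filter (fun o => frOk sequence o qs) oligos.reverse []]
  simp only [List.nil_append, ← List.filter_reverse, List.reverse_reverse]
  exact List.filter_congr (fun o _ => frOk_eq_all sequence o qs)

lemma foldl_filter_eq_filter_all (p : String → List (String × Int) → Bool)
    (qs : List String) (oligos : List (List (String × Int))) :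
    qs.foldl (fun acc q => acc.filter (p q)) oligos =
      oligos.filter (fun o => qs.all (fun q => p q o)) := by
  induction qs generalizing oligos with
  | nil => simp
  | cons q qs ih =>
    simp only [List.foldl_cons, ih, List.filter_filter, List.all_cons]
    exact List.filter_congr (fun o _ => by rw [Bool.and_comm])

-- ===== VERDICT (by name: the statement is the Claim_ definition above) =====
theorem filter_reverse_oligos_spec : Claim_equal_filter_reverse_oligos := by
  intro oligos sequence qs _ _
  unfold Spec_filter_reverse_oligos
  rw [portA_eq, portB_eq, foldl_filter_eq_filter_all]
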